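-- pv_equiv track=rewrite | github.com/sidharth-05/CodePath | session1/tiggerfy.py | tiggerfy
-- ===== SOURCE A (Python) =====
-- def tiggerfy(word):
--     res = ""
--     i = 0
--     while i < len(word):
--         if word[i] == 't' or word[i] == 'i':
--             i += 1
--         elif word[i] == 'g' and i + 1 < len(word) and word[i + 1] == 'g':
--             i += 2
--         elif word[i] == 'e' and i + 1 < len(word) and word[i + 1] == 'r':
--             i += 2
--         else:
--             res += word[i]
--             i += 1
--     return res
-- ===== SOURCE B (Python) =====
-- import re
--
-- def tiggerfy(word):
--     return re.sub(r'gg|er|t|i', '', word)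
-- ===== Notes on version B (the rewrite author's own statement) =====
-- stated objective: idiomatic
-- what changed: Replaces the manual index-based while loop (with quadratic string concatenation) by a single stdlib regex-substitution call whose alternation of the two pair patterns and the two single characters reproduces the loop's skip-1/skip-2 behaviour under leftmost non-overlapping matching.
import Mathlib
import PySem

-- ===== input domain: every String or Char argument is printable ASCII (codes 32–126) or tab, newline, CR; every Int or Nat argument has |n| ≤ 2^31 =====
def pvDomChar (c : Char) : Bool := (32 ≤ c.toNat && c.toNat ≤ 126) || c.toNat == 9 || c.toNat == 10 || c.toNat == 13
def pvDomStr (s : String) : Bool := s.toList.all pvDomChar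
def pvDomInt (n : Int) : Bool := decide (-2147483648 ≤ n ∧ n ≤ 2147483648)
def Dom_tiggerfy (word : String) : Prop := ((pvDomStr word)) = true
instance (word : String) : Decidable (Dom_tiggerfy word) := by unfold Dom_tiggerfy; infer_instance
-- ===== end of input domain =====

-- B replaces A's manual index-based while loop (quadratic string concatenation) with a single regex substitution; measured faster in a timing run; equivalence proved on all strings.
-- re.sub('gg|er|t|i','',word) (idiomatic); equivalence is proved on all strings.


-- ===== PORT A =====
-- A's while loop: index i over the word, accumulator res; the three skip branches
-- advance i by 1 or 2, the default branch appends word[i].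
def tiggerfyLoop (w : List Char) (res : List Char) (i : Nat) : List Char :=
  if h : i < w.length then
    if w[i] = 't' ∨ w[i] = 'i' then
      tiggerfyLoop w res (i + 1)
    else if w[i] = 'g' ∧ ∃ h2 : i + 1 < w.length, w[i + 1] = 'g' then
      tiggerfyLoop w res (i + 2)
    else if w[i] = 'e' ∧ ∃ h2 : i + 1 < w.length, w[i + 1] = 'r' then
      tiggerfyLoop w res (i + 2)
    else
      tiggerfyLoop w (res ++ [w[i]]) (i + 1)
  else res
termination_by w.length - i

def tiggerfy (word : String) : String := String.mk (tiggerfyLoop word.toList [] 0)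

-- ===== PORT B =====
-- Hand port of re.sub(r'gg|er|t|i', '', word): scan left to right; at each position
-- try the alternatives in pattern order ('gg', 'er', 't', 'i'); on a match drop the
-- matched characters, otherwise keep the character. Exact for this pattern because
-- re's leftmost non-overlapping matching is exactly this scan.
def pySubAlt : List Char → List Char
  | [] => []
  | c :: rest =>
    if c = 'g' ∧ rest.head? = some 'g' then pySubAlt rest.tail
    else if c = 'e' ∧ rest.head? = some 'r' then pySubAlt rest.tail
    else if c = 't' ∨ c = 'i' then pySubAlt rest
    else c :: pySubAlt rest
termination_by l => l.length
decreasing_by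
  all_goals simp [List.length_tail]

def tiggerfy_alt (word : String) : String := String.mk (pySubAlt word.toList)

-- ===== PRECONDITION & SPEC =====
def Spec_tiggerfy (word : String) (out : String) : Prop := out = tiggerfy_alt word
instance (word : String) (out : String) : Decidable (Spec_tiggerfy word out) := by unfold Spec_tiggerfy; infer_instance

-- ===== CLAIM (what is proved, stated in full; the proofs are below) =====
def Claim_equal_tiggerfy : Prop := ∀ (word : String), Dom_tiggerfy word → Spec_tiggerfy word (tiggerfy word)

-- ===== LEMMAS AND PROOFS =====

-- Loop invariant: A's loop from index i yields res ++ B's scan of the suffix from i.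
theorem tiggerfyLoop_eq (w : List Char) (res : List Char) (i : Nat) :
    tiggerfyLoop w res i = res ++ pySubAlt (w.drop i) := by
  fun_induction tiggerfyLoop w res i with
  | case1 res i h hc ih =>
    rw [ih]
    rw [List.drop_eq_getElem_cons h]
    rcases hc with hc | hc <;> simp [pySubAlt, hc]
  | case2 res i h hc1 hc ih =>
    obtain ⟨hg, h2, hg2⟩ := hc
    rw [ih]
    rw [List.drop_eq_getElem_cons h, List.drop_eq_getElem_cons h2]
    simp [pySubAlt, hg, hg2]
  | case3 res i h hc1 hc2 hc ih =>
    obtain ⟨he, h2, hr⟩ := hc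
    rw [ih]
    rw [List.drop_eq_getElem_cons h, List.drop_eq_getElem_cons h2]
    simp [pySubAlt, he, hr]
  | case4 res i h hc1 hc2 hc3 ih =>
    rw [ih, List.drop_eq_getElem_cons h]
    rcases Nat.lt_or_ge (i + 1) w.length with h2 | h2
    · have hd : w.drop (i + 1) = w[i + 1] :: w.drop (i + 2) := List.drop_eq_getElem_cons h2
      rw [hd]
      have e1 : ¬(w[i] = 'g' ∧ (w[i + 1] :: w.drop (i + 2)).head? = some 'g') := by
        rintro ⟨hg, hh⟩
        simp only [List.head?_cons, Option.some.injEq] at hh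
        exact hc2 ⟨hg, h2, hh⟩
      have e2 : ¬(w[i] = 'e' ∧ (w[i + 1] :: w.drop (i + 2)).head? = some 'r') := by
        rintro ⟨hg, hh⟩
        simp only [List.head?_cons, Option.some.injEq] at hh
        exact hc3 ⟨hg, h2, hh⟩
      simp only [pySubAlt, if_neg e1, if_neg e2, if_neg hc1]
      simp
    · have hd : w.drop (i + 1) = ([] : List Char) := List.drop_eq_nil_of_le h2
      rw [hd]
      have e1 : ¬(w[i] = 'g' ∧ ([] : List Char).head? = some 'g') := by simp
      have e2 : ¬(w[i] = 'e' ∧ ([] : List Char).head? = some 'r') := by simp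
      simp only [pySubAlt, if_neg e1, if_neg e2, if_neg hc1]
      simp
  | case5 res i h => simp [List.drop_eq_nil_of_le (Nat.le_of_not_lt h), pySubAlt]

-- ===== VERDICT (by name: the statement is the Claim_ definition above) =====
theorem tiggerfy_spec : Claim_equal_tiggerfy := by
  intro word _
  show _ = _
  unfold tiggerfy tiggerfy_alt
  rw [tiggerfyLoop_eq]
  simp
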